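-- pv_equiv track=rewrite | github.com/West-wise/CoTe | 프로그래머스/2/17687. ［3차］ n진수 게임/［3차］ n진수 게임.py | solution
-- ===== SOURCE A (Python) =====
-- def convert(n,decimal):
--     arr = "0123456789ABCDEF"
--     q , r = divmod(decimal,n)
--     if q == 0:
--         return arr[r]
--     else:
--         return convert(n,q) + arr[r]
--
-- def solution(n, t, m, p):
--     answer = ''
--     nlist = ''
--
--     for i in range(t*m):
--         nlist += convert(n,i)
--
--     for i in range(p-1,t*m,m):
--         answer += nlist[i]
--
--     return answer
-- ===== SOURCE B (Python) =====
-- def solution(n, t, m, p):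
--     # Single streaming pass: generate base-n digits of 0,1,2,... and pick every
--     # m-th global position starting at p-1, stopping after t picks (no full string built).
--     digits = "0123456789ABCDEF"
--     answer = []
--     pos = 0
--     i = 0
--     while len(answer) < t:
--         buf = []
--         x = i
--         while True:
--             x, r = divmod(x, n)
--             buf.append(digits[r])
--             if x == 0:
--                 break
--         for ch in reversed(buf):
--             if pos >= p - 1 and (pos - (p - 1)) % m == 0 and len(answer) < t:
--                 answer.append(ch)
--             pos += 1
--         i += 1
--     return ''.join(answer)
-- ===== Notes on version B (the rewrite author's own statement) =====
-- stated objective: alternative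
-- what changed: Instead of materialising the whole concatenated digit string and then indexing it in a second loop, B streams the base-n digits of 0,1,2,... in a single pass, keeping a global position counter and collecting a digit whenever its position is p-1 plus a multiple of m, stopping as soon as t digits are collected.
-- outside the precondition, e.g. on solution(2, 1, 2, 0): A returns '11', B returns '1'; on solution(2, 1, 2, 3): A returns '', B returns '1'
import Mathlib
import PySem

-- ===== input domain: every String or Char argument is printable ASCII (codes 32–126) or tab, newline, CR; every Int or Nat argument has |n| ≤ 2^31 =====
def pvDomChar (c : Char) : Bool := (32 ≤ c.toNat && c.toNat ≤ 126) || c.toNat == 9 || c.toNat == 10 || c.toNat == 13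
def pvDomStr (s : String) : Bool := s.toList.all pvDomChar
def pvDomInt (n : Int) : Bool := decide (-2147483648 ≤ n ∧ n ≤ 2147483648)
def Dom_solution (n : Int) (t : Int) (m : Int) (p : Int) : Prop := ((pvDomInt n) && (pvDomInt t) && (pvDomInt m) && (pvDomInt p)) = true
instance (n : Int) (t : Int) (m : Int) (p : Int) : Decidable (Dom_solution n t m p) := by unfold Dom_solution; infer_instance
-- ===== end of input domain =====

-- B streams the digits in one pass with early termination instead of materialising the
-- whole concatenated string and indexing it in a second pass (objective: alternative).

-- ===== PORT A =====
def pvArrA : List Char := "0123456789ABCDEF".toList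

-- fuel only makes the recursion total; (decimal.toNat + 1) steps always suffice when Python returns
def convertA (fuel : Nat) (n : Int) (decimal : Int) : Option (List Char) :=
  match fuel with
  | 0 => none
  | fuel + 1 =>
    match PySem.Int.divmod? decimal n with
    | none => none
    | some qr =>
      match PySem.List.pyGet? pvArrA qr.2 with
      | none => none
      | some c => if qr.1 = 0 then some [c] else (convertA fuel n qr.1).map (· ++ [c])

def solution (n : Int) (t : Int) (m : Int) (p : Int) : String :=
  let nlist : List Char := (PySem.List.pyRange 0 (t*m) 1).foldl
      (fun acc i => acc ++ (convertA (i.toNat + 1) n i).getD []) []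
  let answer : List Char := (PySem.List.pyRange (p-1) (t*m) m).foldl
      (fun acc i => acc ++ ((PySem.List.pyGet? nlist i).map ([·])).getD []) []
  String.ofList answer

-- ===== PORT B =====
def pvArrB : List Char := "0123456789ABCDEF".toList

-- Source B's inner "while True: x, r = divmod(x, n) …" loop; buf collects digits least-significant first
def altDigits (fuel : Nat) (n : Int) (x : Int) (buf : List Char) : Option (List Char) :=
  match fuel with
  | 0 => none
  | fuel + 1 =>
    match PySem.Int.divmod? x n with
    | none => none
    | some qr =>
      match PySem.List.pyGet? pvArrB qr.2 with
      | none => none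
      | some c => if qr.1 = 0 then some (buf ++ [c]) else altDigits fuel n qr.1 (buf ++ [c])

-- Source B's "for ch in reversed(buf)" body: state is (answer, pos)
def altStep (t : Int) (m : Int) (p : Int) (st : List Char × Int) (c : Char) : List Char × Int :=
  ((if p - 1 ≤ st.2 ∧ PySem.Int.mod (st.2 - (p - 1)) m = 0 ∧ (st.1.length : Int) < t
    then st.1 ++ [c] else st.1), st.2 + 1)

-- Source B's "while len(answer) < t" loop; fuel only makes it total ((t*m).toNat + 1 iterations suffice)
def altLoop (fuel : Nat) (n : Int) (t : Int) (m : Int) (p : Int)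
    (ans : List Char) (pos : Int) (i : Int) : List Char :=
  match fuel with
  | 0 => ans
  | fuel + 1 =>
    if (ans.length : Int) < t then
      match altDigits (i.toNat + 1) n i [] with
      | none => ans
      | some buf =>
        let st := buf.reverse.foldl (altStep t m p) (ans, pos)
        altLoop fuel n t m p st.1 st.2 (i + 1)
    else ans

def solution_alt (n : Int) (t : Int) (m : Int) (p : Int) : String :=
  String.ofList (altLoop ((t.toNat + 2) * m.natAbs + p.toNat + 2) n t m p [] 0 0)

-- ===== PRECONDITION & SPEC =====
-- Pre_ is the problem's natural domain (base 2 ≤ n ≤ 16, step 1 ≤ m, player 1 ≤ p ≤ m; any t),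
-- plus the corners where both selection loops are provably empty and A returns '' (t ≤ 0 with an
-- empty index range, for either sign of m). Outside it Python A raises (n ∉ [2,16] reached by
-- convert: IndexError/ZeroDivisionError/RecursionError; m = 0: ValueError; an index into a too
-- short nlist: IndexError) or returns an accidental value of Python's negative-index wraparound
-- (p ≤ 0) resp. of the range's exclusive end bound (p > m), which B's streaming selection has no
-- reason to reproduce.
def Pre_solution (n : Int) (t : Int) (m : Int) (p : Int) : Prop :=
  (2 ≤ n ∧ n ≤ 16 ∧ 1 ≤ m ∧ 1 ≤ p ∧ p ≤ m)
  ∨ (t ≤ 0 ∧ 1 ≤ m ∧ t * m + 1 ≤ p)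
  ∨ (t = 0 ∧ m ≤ -1 ∧ p ≤ 1)
  ∨ (2 ≤ n ∧ n ≤ 16 ∧ t ≤ 0 ∧ m ≤ -1 ∧ p - 1 ≤ t * m)
instance (n : Int) (t : Int) (m : Int) (p : Int) : Decidable (Pre_solution n t m p) := by
  unfold Pre_solution; infer_instance

def pvWitness_solution : Int × Int × Int × Int := (2, 3, 2, 1)

def Spec_solution (n : Int) (t : Int) (m : Int) (p : Int) (out : String) : Prop := out = solution_alt n t m p
instance (n : Int) (t : Int) (m : Int) (p : Int) (out : String) : Decidable (Spec_solution n t m p out) := by unfold Spec_solution; infer_instance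

-- ===== CLAIM (what is proved, stated in full; the proofs are below) =====
def Claim_equal_solution : Prop := ∀ (n : Int) (t : Int) (m : Int) (p : Int), Dom_solution n t m p → Pre_solution n t m p → Spec_solution n t m p (solution n t m p)

-- ===== LEMMAS AND PROOFS =====

-- reference digit list (most-significant first) of i in base n', n' ≥ 2
def digitsN (n' : Nat) (i : Nat) : List Char :=
  if h : 2 ≤ n' ∧ n' ≤ i then digitsN n' (i / n') ++ [pvArrA.getD (i % n') ' ']
  else [pvArrA.getD (i % n') ' ']
termination_by i
decreasing_by exact Nat.div_lt_self (by omega) (by omega)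

lemma digitsN_ne_nil (n' i : Nat) : digitsN n' i ≠ [] := by
  rw [digitsN]; split <;> simp

-- the concatenated stream of the digits of 0, 1, …, i-1
def Fstream (n' : Nat) (i : Nat) : List Char := (List.range i).flatMap (digitsN n')

lemma length_Fstream_ge (n' i : Nat) : i ≤ (Fstream n' i).length := by
  induction i with
  | zero => simp [Fstream]
  | succ j ih =>
    have h := digitsN_ne_nil n' j
    have : 1 ≤ (digitsN n' j).length := by
      cases hh : digitsN n' j with
      | nil => exact absurd hh h
      | cons a l => simp
    simp only [Fstream, List.range_succ, List.flatMap_append, List.flatMap_cons,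
      List.flatMap_nil, List.length_append]
    simp only [Fstream] at ih
    omega

lemma Fstream_succ (n' i : Nat) :
    Fstream n' (i+1) = Fstream n' i ++ digitsN n' i := by
  simp [Fstream, List.range_succ]

lemma pyGet_arr (j : Nat) (hj : j < 16) :
    PySem.List.pyGet? pvArrA (j : Int) = some (pvArrA.getD j ' ') := by
  rw [PySem.List.pyGet?_natCast]
  have hl : j < pvArrA.length := by simp [pvArrA]; omega
  rw [List.getElem?_eq_getElem hl, List.getD_eq_getElem _ _ hl]

lemma convertA_eq (fuel : Nat) : ∀ (n' i : Nat), 2 ≤ n' → n' ≤ 16 → i < fuel →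
    convertA fuel (n' : Int) (i : Int) = some (digitsN n' i) := by
  induction fuel with
  | zero => intro n' i _ _ h; omega
  | succ f ih =>
    intro n' i h2 h16 hlt
    have hn0 : (n' : Int) ≠ 0 := by omega
    have hmod : i % n' < 16 := by have := Nat.mod_lt i (show 0 < n' by omega); omega
    simp only [convertA, PySem.Int.divmod?, if_neg hn0,
      ← Int.ofNat_fdiv, ← Int.ofNat_fmod, pyGet_arr _ hmod]
    by_cases hq : i / n' = 0
    · have : i < n' := by
        rcases Nat.div_eq_zero_iff.mp hq with h | h
        · omega
        · exact h
      rw [if_pos (by exact_mod_cast hq)]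
      rw [digitsN]
      rw [dif_neg (by omega)]
    · rw [if_neg (by exact_mod_cast hq)]
      have hin : n' ≤ i := by
        by_contra hc
        exact hq (Nat.div_eq_of_lt (by omega))
      have hrec : i / n' < f := by
        have := Nat.div_lt_self (show 0 < i by omega) (show 1 < n' by omega)
        omega
      rw [ih n' (i / n') h2 h16 hrec]
      conv_rhs => rw [digitsN, dif_pos ⟨h2, hin⟩]
      simp

lemma pvArrB_eq : pvArrB = pvArrA := rfl

lemma altDigits_eq (fuel : Nat) : ∀ (n' i : Nat) (buf : List Char), 2 ≤ n' → n' ≤ 16 → i < fuel →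
    altDigits fuel (n' : Int) (i : Int) buf = some (buf ++ (digitsN n' i).reverse) := by
  induction fuel with
  | zero => intro n' i _ _ _ h; omega
  | succ f ih =>
    intro n' i buf h2 h16 hlt
    have hn0 : (n' : Int) ≠ 0 := by omega
    have hmod : i % n' < 16 := by have := Nat.mod_lt i (show 0 < n' by omega); omega
    simp only [altDigits, PySem.Int.divmod?, if_neg hn0,
      ← Int.ofNat_fdiv, ← Int.ofNat_fmod, pvArrB_eq, pyGet_arr _ hmod]
    by_cases hq : i / n' = 0
    · have : i < n' := by
        rcases Nat.div_eq_zero_iff.mp hq with h | h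
        · omega
        · exact h
      rw [if_pos (by exact_mod_cast hq)]
      conv_rhs => rw [digitsN, dif_neg (by omega)]
      simp
    · rw [if_neg (by exact_mod_cast hq)]
      have hin : n' ≤ i := by
        by_contra hc
        exact hq (Nat.div_eq_of_lt (by omega))
      have hrec : i / n' < f := by
        have := Nat.div_lt_self (show 0 < i by omega) (show 1 < n' by omega)
        omega
      rw [ih n' (i / n') _ h2 h16 hrec]
      conv_rhs => rw [digitsN, dif_pos ⟨h2, hin⟩]
      simp

-- positions selected by B, in absolute coordinates
def selN (p1 m' : Nat) : Nat → List Char → List Char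
  | _, [] => []
  | s, c :: cs => (if p1 ≤ s ∧ (s - p1) % m' = 0 then [c] else []) ++ selN p1 m' (s+1) cs

-- the same selection, driven by the distance to the next selected position
def selD (m' : Nat) : Nat → List Char → List Char
  | _, [] => []
  | 0, c :: cs => c :: selD m' (m' - 1) cs
  | d+1, _ :: cs => selD m' d cs

def distF (p1 m' s : Nat) : Nat :=
  if s ≤ p1 then p1 - s else (m' - (s - p1) % m') % m'

lemma selN_append (p1 m' : Nat) : ∀ (A B : List Char) (s : Nat),
    selN p1 m' s (A ++ B) = selN p1 m' s A ++ selN p1 m' (s + A.length) B := by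
  intro A
  induction A with
  | nil => intro B s; simp [selN]
  | cons c cs ih =>
    intro B s
    simp only [List.cons_append, selN, ih, List.length_cons, List.append_assoc]
    ring_nf

lemma mod_compl (m' x : Nat) (hm : 1 ≤ m') (hx : x ≤ m') :
    (m' - x) % m' = if x = 0 ∨ x = m' then 0 else m' - x := by
  split_ifs with h
  · rcases h with h | h
    · subst h; simp [Nat.mod_self]
    · subst h; simp
  · exact Nat.mod_eq_of_lt (by omega)

lemma distF_of_le (p1 m' s : Nat) (hm : 1 ≤ m') (h : p1 ≤ s) :
    distF p1 m' s = (m' - (s - p1) % m') % m' := by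
  unfold distF
  split_ifs with h'
  · have : s = p1 := by omega
    subst this
    simp [Nat.mod_self]
  · rfl

lemma distF_zero_iff (p1 m' s : Nat) (hm : 1 ≤ m') :
    distF p1 m' s = 0 ↔ (p1 ≤ s ∧ (s - p1) % m' = 0) := by
  rcases Nat.lt_or_ge s p1 with h | h
  · unfold distF
    rw [if_pos (by omega)]
    omega
  · rw [distF_of_le p1 m' s hm h]
    have hr : (s - p1) % m' < m' := Nat.mod_lt _ (by omega)
    rw [mod_compl m' _ hm (by omega)]
    split_ifs with hc
    · rcases hc with hc | hc
      · simp [hc, h]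
      · omega
    · constructor
      · intro he; omega
      · intro ⟨_, he⟩; omega

lemma distF_succ (p1 m' s : Nat) (hm : 1 ≤ m') :
    distF p1 m' (s+1) = if distF p1 m' s = 0 then m' - 1 else distF p1 m' s - 1 := by
  rcases Nat.lt_or_ge s p1 with h | h
  · have hds : distF p1 m' s = p1 - s := by unfold distF; rw [if_pos (by omega)]
    rw [hds, if_neg (by omega)]
    unfold distF
    rw [if_pos (by omega)]
    omega
  · rw [distF_of_le p1 m' s hm h, distF_of_le p1 m' (s+1) hm (by omega)]
    have ha : s + 1 - p1 = (s - p1) + 1 := by omega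
    rw [ha]
    set a := s - p1 with hadef
    have hr : a % m' < m' := Nat.mod_lt _ (by omega)
    by_cases hm1 : m' = 1
    · subst hm1
      simp [Nat.mod_one]
    · have h1m : 1 % m' = 1 := Nat.mod_eq_of_lt (by omega)
      by_cases hc : a % m' + 1 = m'
      · have e2 : (a+1) % m' = 0 := by
          rw [Nat.add_mod, h1m, hc, Nat.mod_self]
        have e3 : (m' - (a+1) % m') % m' = 0 := by rw [e2, Nat.sub_zero, Nat.mod_self]
        have e4 : (m' - a % m') % m' = m' - a % m' := Nat.mod_eq_of_lt (by omega)
        rw [e3, e4, if_neg (by omega)]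
        omega
      · have e2 : (a+1) % m' = a % m' + 1 := by
          rw [Nat.add_mod, h1m]; exact Nat.mod_eq_of_lt (by omega)
        have e3 : (m' - (a+1) % m') % m' = m' - (a % m' + 1) := by
          rw [e2]; exact Nat.mod_eq_of_lt (by omega)
        rw [e3]
        by_cases hz : a % m' = 0
        · have e4 : (m' - a % m') % m' = 0 := by rw [hz, Nat.sub_zero, Nat.mod_self]
          rw [e4, if_pos rfl]; omega
        · have e4 : (m' - a % m') % m' = m' - a % m' := Nat.mod_eq_of_lt (by omega)
          rw [e4, if_neg (by omega)]; omega

lemma selN_eq_selD (p1 m' : Nat) (hm : 1 ≤ m') : ∀ (L : List Char) (s : Nat),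
    selN p1 m' s L = selD m' (distF p1 m' s) L := by
  intro L
  induction L with
  | nil => intro s; cases h : distF p1 m' s <;> simp [selN, selD]
  | cons c cs ih =>
    intro s
    cases hd : distF p1 m' s with
    | zero =>
      have hC : p1 ≤ s ∧ (s - p1) % m' = 0 := (distF_zero_iff p1 m' s hm).mp hd
      have hs : distF p1 m' (s+1) = m' - 1 := by rw [distF_succ p1 m' s hm, hd]; simp
      simp only [selN, if_pos hC, selD, ih, hs, List.singleton_append]
    | succ e =>
      have hC : ¬(p1 ≤ s ∧ (s - p1) % m' = 0) := by
        intro hc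
        rw [(distF_zero_iff p1 m' s hm).mpr hc] at hd
        exact Nat.noConfusion hd
      have hs : distF p1 m' (s+1) = e := by
        rw [distF_succ p1 m' s hm, hd]
        simp
      simp only [selN, if_neg hC, selD, ih, hs, List.nil_append]

lemma selD_take (m' : Nat) (hm : 1 ≤ m') : ∀ (L : List Char) (d t' : Nat),
    d + t' * m' < L.length + m' →
    (selD m' d L).take t' = (List.range t').map (fun k => L.getD (d + k * m') ' ') := by
  intro L
  induction L with
  | nil =>
    intro d t' hlen
    cases t' with
    | zero => simp
    | succ u =>
      exfalso
      have : m' ≤ (u+1) * m' := Nat.le_mul_of_pos_left m' (Nat.succ_pos u)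
      simp at hlen
      omega
  | cons c cs ih =>
    intro d t' hlen
    cases t' with
    | zero => simp
    | succ u =>
      cases d with
      | zero =>
        have hmm : (u+1) * m' = u * m' + m' := by ring
        have hrec := ih (m' - 1) u (by rw [hmm] at hlen; simp at hlen ⊢; omega)
        simp only [selD, List.take_succ_cons, hrec, List.range_succ_eq_map, List.map_cons,
          List.map_map]
        congr 1
        · simp
        · apply List.map_congr_left
          intro k _
          have he : (k + 1) * m' = (m' - 1 + k * m') + 1 := by
            have : 1 ≤ m' := hm
            calc (k + 1) * m' = k * m' + m' := by ring
            _ = (m' - 1 + k * m') + 1 := by omega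
          simp only [Function.comp_apply, Nat.succ_eq_add_one, Nat.zero_add, he,
            List.getD_cons_succ]
      | succ e =>
        have hrec := ih e (u+1) (by simp at hlen ⊢; omega)
        simp only [selD, hrec]
        apply List.map_congr_left
        intro k _
        have he : e + 1 + k * m' = (e + k * m') + 1 := by omega
        rw [he, List.getD_cons_succ]

lemma inner_fold (t m p : Int) (T p1 m' : Nat)
    (ht : t = (T : Int)) (hm : m = (m' : Int)) (hm1 : 1 ≤ m') (hp : p - 1 = (p1 : Int)) :
    ∀ (ds : List Char) (s : Nat) (X : List Char),
    ds.foldl (altStep t m p) (X.take T, (s : Int)) =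
      ((X ++ selN p1 m' s ds).take T, (s : Int) + ds.length) := by
  intro ds
  induction ds with
  | nil => intro s X; simp [selN]
  | cons c ds ih =>
    intro s X
    have hcond : (p - 1 ≤ (s : Int) ∧ PySem.Int.mod ((s : Int) - (p - 1)) m = 0)
        ↔ (p1 ≤ s ∧ (s - p1) % m' = 0) := by
      rw [hp, hm, PySem.Int.mod_eq_emod_of_pos (show (0:Int) < (m' : Int) by exact_mod_cast hm1)]
      constructor
      · rintro ⟨h1, h2⟩
        have h1' : p1 ≤ s := by exact_mod_cast h1
        refine ⟨h1', ?_⟩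
        rw [show ((s : Int) - (p1 : Int)) = ((s - p1 : Nat) : Int) by omega] at h2
        exact_mod_cast h2
      · rintro ⟨h1, h2⟩
        refine ⟨by exact_mod_cast h1, ?_⟩
        rw [show ((s : Int) - (p1 : Int)) = ((s - p1 : Nat) : Int) by omega]
        exact_mod_cast h2
    have hcap : (((X.take T).length : Int) < t) ↔ X.length < T := by
      rw [ht]
      simp only [List.length_take]
      omega
    simp only [List.foldl_cons]
    by_cases hC : p1 ≤ s ∧ (s - p1) % m' = 0
    · by_cases hX : X.length < T
      · have hstep : altStep t m p (X.take T, (s : Int)) c = ((X ++ [c]).take T, ((s+1 : Nat) : Int)) := by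
          unfold altStep
          have hc := hcond.mpr hC
          rw [if_pos ⟨hc.1, hc.2, hcap.mpr hX⟩]
          rw [List.take_of_length_le (by omega), List.take_of_length_le (by simp; omega)]
          simp
        rw [hstep, ih (s+1) (X ++ [c])]
        have hsel : selN p1 m' s (c :: ds) = [c] ++ selN p1 m' (s+1) ds := by
          simp only [selN, if_pos hC]
        rw [hsel]
        exact congrArg₂ Prod.mk (by rw [List.append_assoc]) (by push_cast [List.length_cons]; ring)
      · have hstep : altStep t m p (X.take T, (s : Int)) c = ((X ++ [c]).take T, ((s+1 : Nat) : Int)) := by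
          unfold altStep
          rw [if_neg (by intro hh; exact hX (hcap.mp hh.2.2))]
          rw [List.take_append_of_le_length (by omega)]
          simp
        rw [hstep, ih (s+1) (X ++ [c])]
        have hsel : selN p1 m' s (c :: ds) = [c] ++ selN p1 m' (s+1) ds := by
          simp only [selN, if_pos hC]
        rw [hsel]
        exact congrArg₂ Prod.mk (by rw [List.append_assoc]) (by push_cast [List.length_cons]; ring)
    · have hstep : altStep t m p (X.take T, (s : Int)) c = (X.take T, ((s+1 : Nat) : Int)) := by
        unfold altStep
        rw [if_neg (by intro hh; exact hC (hcond.mp ⟨hh.1, hh.2.1⟩))]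
        simp
      rw [hstep, ih (s+1) X]
      have hsel : selN p1 m' s (c :: ds) = selN p1 m' (s+1) ds := by
        simp only [selN, if_neg hC, List.nil_append]
      rw [hsel]
      exact congrArg₂ Prod.mk rfl (by push_cast [List.length_cons]; ring)

lemma distF_zero_start (p1 m' : Nat) : distF p1 m' 0 = p1 := by
  unfold distF
  rw [if_pos (Nat.zero_le p1)]
  omega

lemma selN_take_len (n' T p1 m' : Nat) (hm1 : 1 ≤ m') (hp1 : p1 < m') :
    T ≤ (selN p1 m' 0 (Fstream n' (T * m'))).length := by
  have hlen : T * m' ≤ (Fstream n' (T * m')).length := length_Fstream_ge n' (T * m')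
  have hchar := selD_take m' hm1 (Fstream n' (T * m')) p1 T (by omega)
  rw [selN_eq_selD p1 m' hm1, distF_zero_start]
  have := congrArg List.length hchar
  simp only [List.length_take, List.length_map, List.length_range] at this
  omega

lemma outer_loop (n t m p : Int) (n' T p1 m' : Nat)
    (hn : n = (n' : Int)) (ht : t = (T : Int)) (hm : m = (m' : Int)) (hp : p - 1 = (p1 : Int))
    (hn2 : 2 ≤ n') (hn16 : n' ≤ 16) (hm1 : 1 ≤ m') (hp1 : p1 < m') :
    ∀ (fuel i : Nat), i ≤ T * m' → T * m' + 1 ≤ fuel + i →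
    altLoop fuel n t m p ((selN p1 m' 0 (Fstream n' i)).take T)
        ((Fstream n' i).length : Int) (i : Int)
      = (selN p1 m' 0 (Fstream n' (T * m'))).take T := by
  intro fuel
  induction fuel with
  | zero => intro i h1 h2; omega
  | succ f ih =>
    intro i hi hfuel
    have hfull := selN_take_len n' T p1 m' hm1 hp1
    by_cases hQ : (selN p1 m' 0 (Fstream n' i)).length < T
    · have hiN : i < T * m' := by
        rcases Nat.eq_or_lt_of_le hi with he | h
        · exfalso; rw [he] at hQ; omega
        · exact h
      unfold altLoop
      rw [if_pos (by rw [ht]; simp only [List.length_take]; exact_mod_cast (by omega : min T (selN p1 m' 0 (Fstream n' i)).length < T))]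
      rw [show ((i : Int).toNat + 1) = i + 1 by rw [Int.toNat_natCast], hn,
        altDigits_eq (i+1) n' i [] hn2 hn16 (by omega)]
      simp only [List.nil_append, List.reverse_reverse]
      rw [← hn]
      have hfold := inner_fold t m p T p1 m' ht hm hm1 hp (digitsN n' i)
        (Fstream n' i).length (selN p1 m' 0 (Fstream n' i))
      rw [hfold]
      have hsel : selN p1 m' 0 (Fstream n' i) ++ selN p1 m' ((Fstream n' i).length) (digitsN n' i)
          = selN p1 m' 0 (Fstream n' (i+1)) := by
        rw [Fstream_succ, selN_append, Nat.zero_add]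
      have hlen : ((Fstream n' i).length : Int) + (digitsN n' i).length
          = ((Fstream n' (i+1)).length : Int) := by
        rw [Fstream_succ]
        push_cast [List.length_append]
        ring
      rw [hsel, hlen, show ((i : Int) + 1) = ((i + 1 : Nat) : Int) by push_cast; ring]
      exact ih (i+1) (by omega) (by omega)
    · unfold altLoop
      rw [if_neg (by rw [ht]; simp only [List.length_take]; exact_mod_cast (by omega : ¬ min T (selN p1 m' 0 (Fstream n' i)).length < T))]
      have hF : Fstream n' (T * m') = Fstream n' i
          ++ ((List.range (T * m' - i)).map (fun x => i + x)).flatMap (digitsN n') := by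
        unfold Fstream
        conv_lhs => rw [show T * m' = i + (T * m' - i) from by omega, List.range_add]
        rw [List.flatMap_append]
      rw [hF, selN_append, List.take_append_of_le_length (by omega)]

lemma division_count (T m' p1 : Nat) (hm1 : 1 ≤ m') (hp1 : p1 < m') (hT1 : 1 ≤ T) :
    (T * m' + (m' - 1 - p1)) / m' = T := by
  rw [Nat.add_comm, Nat.add_mul_div_right _ _ (by omega : 0 < m'),
    Nat.div_eq_of_lt (by omega)]
  omega

lemma pyRange_neg_nil (start stop s : Int) (hs : s < 0) (h : start ≤ stop) :
    PySem.List.pyRange start stop s = [] := by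
  unfold PySem.List.pyRange
  rw [if_neg (by omega)]
  simp only
  rw [if_neg (by omega), if_neg (by omega)]
  simp

lemma solution_empty_of_range_nil (n t m p : Int)
    (h : PySem.List.pyRange (p-1) (t*m) m = []) : solution n t m p = String.ofList [] := by
  unfold solution
  rw [h]
  rfl

lemma alt_empty (n t m p : Int) (ht : t ≤ 0) : solution_alt n t m p = String.ofList [] := by
  unfold solution_alt
  show String.ofList
      (altLoop (((t.toNat + 2) * m.natAbs + p.toNat + 1) + 1) n t m p [] 0 0) = _
  unfold altLoop
  rw [if_neg (by simp; omega)]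

theorem solution_lists_eq (n t m p : Int) (hpre : Pre_solution n t m p) :
    solution n t m p = solution_alt n t m p := by
  rcases hpre with ⟨hn2, hn16, hm1, hp1, hpm⟩ | ⟨ht0, hm1, hp⟩ | ⟨ht0, hm1, hp⟩ | ⟨hn2, hn16, ht0, hm1, hp⟩
  · -- main region: 2 ≤ n ≤ 16, 1 ≤ p ≤ m
    by_cases ht0 : t ≤ 0
    · -- t ≤ 0: both loops run zero times and both return ""
      have htm : t * m ≤ 0 := by
        have := mul_le_mul_of_nonneg_right ht0 (show (0:Int) ≤ m by omega)
        simpa using this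
      rw [solution_empty_of_range_nil n t m p (by
          rw [PySem.List.pyRange_of_pos _ _ (show (0:Int) < m by omega), if_neg (by omega)]
          simp),
        alt_empty n t m p ht0]
    · rw [not_le] at ht0
      set n' := n.toNat with hn'def
      set T := t.toNat with hTdef
      set m' := m.toNat with hm'def
      set p1 := (p-1).toNat with hp1def
      have hn : n = (n' : Int) := by omega
      have ht : t = (T : Int) := by omega
      have hm : m = (m' : Int) := by omega
      have hp : p - 1 = (p1 : Int) := by omega
      have hn2' : 2 ≤ n' := by omega
      have hn16' : n' ≤ 16 := by omega
      have hm1' : 1 ≤ m' := by omega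
      have hp1' : p1 < m' := by omega
      have hT1 : 1 ≤ T := by omega
      have hTnat : t.toNat = T := hTdef.symm
      have hmabs : m.natAbs = m' := by omega
      clear_value n' T m' p1
      clear hn'def hTdef hm'def hp1def
      have hm'N : m' ≤ T * m' := Nat.le_mul_of_pos_left m' (by omega)
      have hNle : T * m' ≤ (Fstream n' (T * m')).length := length_Fstream_ge n' (T * m')
      have htm : t * m = ((T * m' : Nat) : Int) := by rw [ht, hm]; push_cast; ring
      have hnlist : (PySem.List.pyRange 0 (t*m) 1).foldl
          (fun acc i => acc ++ (convertA (i.toNat + 1) n i).getD []) []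
          = Fstream n' (T * m') := by
        rw [htm, PySem.List.pyRange_one, List.foldl_map, PySem.List.foldl_append_eq_flatMap]
        simp only [List.nil_append]
        rw [show (((T * m' : Nat) : Int) - 0).toNat = T * m' by omega]
        unfold Fstream
        apply List.flatMap_congr
        intro k hk
        have hkN : k < T * m' := List.mem_range.mp hk
        rw [show (0 + (k : Int)) = (k : Int) from by ring, Int.toNat_natCast, hn,
          convertA_eq (k+1) n' k hn2' hn16' (by omega)]
        rfl
      have hidx : PySem.List.pyRange (p-1) (t*m) m
          = (List.range T).map (fun k => ((p1 + k * m' : Nat) : Int)) := by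
        rw [PySem.List.pyRange_of_pos _ _ (show (0:Int) < m by omega)]
        have hlt : p - 1 < t * m := by
          rw [htm, hp]
          exact_mod_cast (by omega : p1 < T * m')
        rw [if_pos hlt]
        have hnum : t * m - (p-1) + m - 1 = ((T * m' + (m' - 1 - p1) : Nat) : Int) := by
          rw [htm, hp, hm]; push_cast; omega
        rw [hnum, hm]
        rw [show ((T * m' + (m' - 1 - p1) : Nat) : Int) / ((m' : Nat) : Int)
              = (((T * m' + (m' - 1 - p1)) / m' : Nat) : Int) from Int.ofNat_ediv_ofNat]
        rw [division_count T m' p1 hm1' hp1' hT1, Int.toNat_natCast]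
        apply List.map_congr_left
        intro k hk
        simp only [hp]
        push_cast
        ring
      have hbound : ∀ k, k < T → p1 + k * m' < (Fstream n' (T * m')).length := by
        intro k hk
        have h1 : k * m' ≤ (T-1) * m' := Nat.mul_le_mul_right m' (by omega)
        have h2 : (T - 1) * m' + m' = T * m' := by
          cases T with
          | zero => omega
          | succ u => simp; ring
        omega
      have hA : ((List.range T).map (fun k => ((p1 + k * m' : Nat) : Int))).foldl
          (fun acc i => acc ++ ((PySem.List.pyGet? (Fstream n' (T * m')) i).map ([·])).getD []) []
          = (List.range T).map (fun k => (Fstream n' (T * m')).getD (p1 + k * m') ' ') := by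
        rw [List.foldl_map, PySem.List.foldl_append_eq_flatMap]
        simp only [List.nil_append]
        rw [List.map_eq_flatMap]
        apply List.flatMap_congr
        intro k hk
        have hkT : k < T := List.mem_range.mp hk
        have hb := hbound k hkT
        rw [PySem.List.pyGet?_natCast, List.getElem?_eq_getElem hb]
        simp only [Option.map_some, Option.getD_some]
        rw [List.getD_eq_getElem _ _ hb]
      have hfuel : T * m' + 1 ≤ (t.toNat + 2) * m.natAbs + p.toNat + 2 := by
        rw [hmabs, hTnat]
        have : (T + 2) * m' = T * m' + 2 * m' := by ring
        omega
      have hB : altLoop ((t.toNat + 2) * m.natAbs + p.toNat + 2) n t m p [] 0 0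
          = (List.range T).map (fun k => (Fstream n' (T * m')).getD (p1 + k * m') ' ') := by
        have h0 : altLoop ((t.toNat + 2) * m.natAbs + p.toNat + 2) n t m p [] 0 0
            = altLoop ((t.toNat + 2) * m.natAbs + p.toNat + 2) n t m p
                ((selN p1 m' 0 (Fstream n' 0)).take T)
                ((Fstream n' 0).length : Int) ((0 : Nat) : Int) := by
          simp [Fstream, selN]
        rw [h0,
          outer_loop n t m p n' T p1 m' hn ht hm hp hn2' hn16' hm1' hp1'
            ((t.toNat + 2) * m.natAbs + p.toNat + 2) 0 (by omega) (by omega),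
          selN_eq_selD p1 m' hm1', distF_zero_start,
          selD_take m' hm1' _ p1 T (by omega)]
      unfold solution solution_alt
      rw [hnlist, hidx]
      show String.ofList (((List.range T).map (fun k => ((p1 + k * m' : Nat) : Int))).foldl
          (fun acc i => acc ++ ((PySem.List.pyGet? (Fstream n' (T * m')) i).map ([·])).getD []) [])
        = String.ofList (altLoop ((t.toNat + 2) * m.natAbs + p.toNat + 2) n t m p [] 0 0)
      rw [hA, hB]
  · -- t ≤ 0, m ≥ 1, p ≥ t*m + 1: A's index range is empty, B collects nothing
    rw [solution_empty_of_range_nil n t m p (by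
        rw [PySem.List.pyRange_of_pos _ _ (show (0:Int) < m by omega), if_neg (by omega)]
        simp),
      alt_empty n t m p ht0]
  · -- t = 0, m ≤ -1, p ≤ 1: A's (descending) index range is empty, B collects nothing
    rw [solution_empty_of_range_nil n t m p
        (pyRange_neg_nil _ _ _ (by omega) (by rw [ht0]; omega)),
      alt_empty n t m p (by omega)]
  · -- 2 ≤ n ≤ 16, t ≤ 0, m ≤ -1, p - 1 ≤ t*m: A builds nlist but selects nothing
    rw [solution_empty_of_range_nil n t m p
        (pyRange_neg_nil _ _ _ (by omega) (by omega)),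
      alt_empty n t m p ht0]

-- ===== VERDICT (by name: the statement is the Claim_ definition above) =====
theorem solution_spec : Claim_equal_solution := by
  unfold Claim_equal_solution Spec_solution
  intro n t m p _ hpre
  exact solution_lists_eq n t m p hpre
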